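-- pv_equiv track=rewrite | github.com/WarfareCode/gcblue | scripts/Amram_AI_Weapon_Lists.py | target_flags
-- ===== SOURCE A (Python) =====
-- def target_flags(flag, val):
--     while flag > 0:
--         if flag ==  val:
--             return True
--         elif flag < val:
--             return False
--         else:
--             if flag >= 16:
--                 flag -= 16
--             elif flag >= 8:
--                 flag -= 8
--             elif flag >= 4:
--                 flag -= 4
--             elif flag >= 2:
--                 flag -= 2
--             elif flag >= 1:
--                 flag -= 1
--     return False
-- ===== SOURCE B (Python) =====
-- def target_flags(flag, val):
--     # O(1): val is hit iff it lies on the arithmetic 16-descent from flag,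
--     # or is a binary-suffix value of the final residue m = flag % 16.
--     if val <= 0 or flag <= 0:
--         return False
--     m = flag % 16
--     if m == 0:
--         return val % 16 == 0 and val <= flag
--     if val % 16 == m and m <= val <= flag:
--         return True
--     return val < m and (val == m % 2 or val == m % 4 or val == m % 8)
-- ===== Notes on version B (the rewrite author's own statement) =====
-- stated objective: faster
-- what changed: Replaced A's subtract-16/8/4/2/1 descent loop with a closed-form O(1) test: val is reached iff it is on the arithmetic 16-descent (val % 16 == flag % 16, m <= val <= flag) or equals a binary-suffix value (m % 2, m % 4, m % 8) of the final residue m = flag % 16.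
import Mathlib
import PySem

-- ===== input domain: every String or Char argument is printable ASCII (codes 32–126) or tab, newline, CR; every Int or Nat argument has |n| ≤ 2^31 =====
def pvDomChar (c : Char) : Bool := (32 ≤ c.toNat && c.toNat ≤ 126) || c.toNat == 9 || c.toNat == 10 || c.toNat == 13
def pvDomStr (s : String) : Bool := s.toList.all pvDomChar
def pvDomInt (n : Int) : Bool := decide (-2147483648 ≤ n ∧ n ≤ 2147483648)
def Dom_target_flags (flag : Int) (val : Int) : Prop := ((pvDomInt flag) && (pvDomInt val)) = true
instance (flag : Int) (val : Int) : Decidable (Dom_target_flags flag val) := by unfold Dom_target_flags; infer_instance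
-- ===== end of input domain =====

-- B replaces A's O(flag) subtraction loop with an O(1) closed-form membership test.

-- ===== PORT A =====
-- literal port of A's while loop as recursion on the decreasing flag
def target_flags (flag : Int) (val : Int) : Bool :=
  if h : flag > 0 then
    if flag = val then true
    else if flag < val then false
    else if flag ≥ 16 then target_flags (flag - 16) val
    else if flag ≥ 8 then target_flags (flag - 8) val
    else if flag ≥ 4 then target_flags (flag - 4) val
    else if flag ≥ 2 then target_flags (flag - 2) val
    else target_flags (flag - 1) val
  else false
termination_by flag.toNat
decreasing_by all_goals omega

-- ===== PORT B =====
-- port of Source B (Python '%' with positive divisor coincides with Int.emod, which Lean's '%' is)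
def target_flags_alt (flag : Int) (val : Int) : Bool :=
  if val ≤ 0 ∨ flag ≤ 0 then false
  else
    let m := flag % 16
    if m = 0 then decide (val % 16 = 0 ∧ val ≤ flag)
    else if val % 16 = m ∧ m ≤ val ∧ val ≤ flag then true
    else decide (val < m ∧ (val = m % 2 ∨ val = m % 4 ∨ val = m % 8))

-- ===== PRECONDITION & SPEC =====
def Spec_target_flags (flag : Int) (val : Int) (out : Bool) : Prop := out = target_flags_alt flag val
instance (flag : Int) (val : Int) (out : Bool) : Decidable (Spec_target_flags flag val out) := by unfold Spec_target_flags; infer_instance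

-- ===== CLAIM (what is proved, stated in full; the proofs are below) =====
def Claim_equal_target_flags : Prop := ∀ (flag : Int) (val : Int), Dom_target_flags flag val → Spec_target_flags flag val (target_flags flag val)

-- ===== LEMMAS AND PROOFS =====

lemma alt_nonpos (flag val : Int) (h : flag ≤ 0) : target_flags_alt flag val = false := by
  unfold target_flags_alt; split_ifs with h1 <;> simp_all <;> omega

lemma alt_eq_self (flag val : Int) (h : 0 < flag) (h2 : flag = val) :
    target_flags_alt flag val = true := by
  subst h2
  unfold target_flags_alt
  split_ifs with h1 h2 h3 h4 <;> simp_all <;> omega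

lemma alt_gt (flag val : Int) (h : flag < val) : target_flags_alt flag val = false := by
  unfold target_flags_alt
  split_ifs with h1 h2 h3 h4 <;> simp_all <;> omega

lemma alt_step16 (flag val : Int) (h : 16 ≤ flag) (h2 : val < flag) :
    target_flags_alt (flag - 16) val = target_flags_alt flag val := by
  unfold target_flags_alt
  split_ifs
  all_goals try rfl
  all_goals try omega
  all_goals rw [Bool.eq_iff_iff]
  all_goals simp only [decide_eq_true_eq, Bool.false_eq_true, Bool.true_eq_false,
    false_iff, true_iff, iff_false, iff_true]
  all_goals try omega
  all_goals try split_ifs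
  all_goals simp only [decide_eq_true_eq, Bool.false_eq_true, Bool.true_eq_false, eq_self_iff_true,
    false_iff, true_iff, iff_false, iff_true]
  all_goals omega

lemma alt_step8 (flag val : Int) (h : 8 ≤ flag) (h' : flag < 16) (h2 : val < flag) :
    target_flags_alt (flag - 8) val = target_flags_alt flag val := by
  unfold target_flags_alt
  split_ifs
  all_goals try rfl
  all_goals try omega
  all_goals rw [Bool.eq_iff_iff]
  all_goals simp only [decide_eq_true_eq, Bool.false_eq_true, Bool.true_eq_false,
    false_iff, true_iff, iff_false, iff_true]
  all_goals try omega
  all_goals try split_ifs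
  all_goals simp only [decide_eq_true_eq, Bool.false_eq_true, Bool.true_eq_false, eq_self_iff_true,
    false_iff, true_iff, iff_false, iff_true]
  all_goals omega

lemma alt_step4 (flag val : Int) (h : 4 ≤ flag) (h' : flag < 8) (h2 : val < flag) :
    target_flags_alt (flag - 4) val = target_flags_alt flag val := by
  unfold target_flags_alt
  split_ifs
  all_goals try rfl
  all_goals try omega
  all_goals rw [Bool.eq_iff_iff]
  all_goals simp only [decide_eq_true_eq, Bool.false_eq_true, Bool.true_eq_false,
    false_iff, true_iff, iff_false, iff_true]
  all_goals try omega
  all_goals try split_ifs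
  all_goals simp only [decide_eq_true_eq, Bool.false_eq_true, Bool.true_eq_false, eq_self_iff_true,
    false_iff, true_iff, iff_false, iff_true]
  all_goals omega

lemma alt_step2 (flag val : Int) (h : 2 ≤ flag) (h' : flag < 4) (h2 : val < flag) :
    target_flags_alt (flag - 2) val = target_flags_alt flag val := by
  unfold target_flags_alt
  split_ifs
  all_goals try rfl
  all_goals try omega
  all_goals rw [Bool.eq_iff_iff]
  all_goals simp only [decide_eq_true_eq, Bool.false_eq_true, Bool.true_eq_false,
    false_iff, true_iff, iff_false, iff_true]
  all_goals try omega
  all_goals try split_ifs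
  all_goals simp only [decide_eq_true_eq, Bool.false_eq_true, Bool.true_eq_false, eq_self_iff_true,
    false_iff, true_iff, iff_false, iff_true]
  all_goals omega

lemma alt_step1 (flag val : Int) (h : flag = 1) (h2 : val < flag) :
    target_flags_alt (flag - 1) val = target_flags_alt flag val := by
  subst h
  unfold target_flags_alt
  split_ifs
  all_goals try rfl
  all_goals try omega
  all_goals rw [Bool.eq_iff_iff]
  all_goals simp only [decide_eq_true_eq, Bool.false_eq_true, Bool.true_eq_false,
    false_iff, true_iff, iff_false, iff_true]
  all_goals try omega
  all_goals try split_ifs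
  all_goals simp only [decide_eq_true_eq, Bool.false_eq_true, Bool.true_eq_false, eq_self_iff_true,
    false_iff, true_iff, iff_false, iff_true]
  all_goals omega

lemma main_equiv (n : Nat) : ∀ flag val : Int, flag.toNat ≤ n →
    target_flags flag val = target_flags_alt flag val := by
  induction n with
  | zero =>
      intro flag val h
      rw [target_flags.eq_def]
      have : ¬ flag > 0 := by omega
      simp [this, alt_nonpos flag val (by omega)]
  | succ n ih =>
      intro flag val h
      rw [target_flags.eq_def]
      split_ifs with h1 h2 h3 h4 h5 h6 h7
      · exact (alt_eq_self flag val h1 h2).symm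
      · exact (alt_gt flag val h3).symm
      · rw [ih (flag - 16) val (by omega)]
        exact alt_step16 flag val h4 (by omega)
      · rw [ih (flag - 8) val (by omega)]
        exact alt_step8 flag val h5 (by omega) (by omega)
      · rw [ih (flag - 4) val (by omega)]
        exact alt_step4 flag val h6 (by omega) (by omega)
      · rw [ih (flag - 2) val (by omega)]
        exact alt_step2 flag val h7 (by omega) (by omega)
      · rw [ih (flag - 1) val (by omega)]
        exact alt_step1 flag val (by omega) (by omega)
      · exact (alt_nonpos flag val (by omega)).symm

-- ===== VERDICT (by name: the statement is the Claim_ definition above) =====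
theorem target_flags_spec : Claim_equal_target_flags := by
  intro flag val _
  unfold Spec_target_flags
  exact main_equiv flag.toNat flag val le_rfl
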